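-- pv_equiv track=rewrite | github.com/YTvW/AoC2021 | day12/day12-part2.py | duplicateCheck
-- ===== SOURCE A (Python) =====
-- from collections import Counter
--
-- def duplicateCheck(path):
--   check = False
--   counter = Counter(filter(lambda x: x.islower(),path[1::]))
--
--   for key in counter:
--     if counter[key]>2:
--       return False
--     elif counter[key]>1:
--       if check:
--         return False
--       else:
--         check = True
--   return True
-- ===== SOURCE B (Python) =====
-- def duplicateCheck(path):
--   lower = [x for x in path[1:] if x.islower()]
--   return len(lower) - len(set(lower)) <= 1
-- ===== Notes on version B (the rewrite author's own statement) =====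
-- stated objective: simpler
-- what changed: Replaces the Counter plus per-key loop with early returns and a 'check' flag by a closed-form test: the number of extra lowercase visits, len(lower) - len(set(lower)), must be at most 1.
import Mathlib
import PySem

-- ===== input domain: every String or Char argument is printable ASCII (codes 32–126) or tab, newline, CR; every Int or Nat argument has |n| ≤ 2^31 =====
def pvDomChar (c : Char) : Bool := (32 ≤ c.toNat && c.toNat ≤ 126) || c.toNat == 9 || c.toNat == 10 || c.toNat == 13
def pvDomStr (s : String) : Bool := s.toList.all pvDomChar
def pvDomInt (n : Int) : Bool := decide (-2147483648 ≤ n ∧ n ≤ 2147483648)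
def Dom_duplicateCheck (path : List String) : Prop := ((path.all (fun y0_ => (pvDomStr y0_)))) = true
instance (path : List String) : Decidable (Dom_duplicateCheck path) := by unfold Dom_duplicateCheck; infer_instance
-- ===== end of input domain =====

-- B replaces A's Counter + per-key loop-with-flag by a closed-form comparison
-- (extra lowercase visits = len(lower) - len(set(lower)) ≤ 1); objective: simpler.


-- str.islower(): at least one lowercase letter and no uppercase letter
-- (exact on the printable-ASCII domain, where the cased characters are exactly the letters)
def pyStrIslower (s : String) : Bool :=
  s.toList.any PySem.Chars.islower && s.toList.all (fun c => !(PySem.Chars.isupper c))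

-- ===== PORT A =====
-- the 'for key in counter:' loop with its early returns and the 'check' flag
def dupLoopA (counter : PySem.Dict String Int) : List String → Bool → Bool
  | [], _ => true
  | k :: ks, check =>
    if counter.getD k 0 > 2 then false
    else if counter.getD k 0 > 1 then
      if check then false else dupLoopA counter ks true
    else dupLoopA counter ks check

def duplicateCheck (path : List String) : Bool :=
  let counter := PySem.Dict.counter ((PySem.List.slice path (some 1) none).filter pyStrIslower)
  dupLoopA counter counter.keys false

-- ===== PORT B =====
def duplicateCheck_alt (path : List String) : Bool :=
  let lower := (PySem.List.slice path (some 1) none).filter pyStrIslower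
  decide ((lower.length : Int) - ((PySem.Set.ofList lower).length : Int) ≤ 1)

-- ===== PRECONDITION & SPEC =====
def Spec_duplicateCheck (path : List String) (out : Bool) : Prop := out = duplicateCheck_alt path
instance (path : List String) (out : Bool) : Decidable (Spec_duplicateCheck path out) := by unfold Spec_duplicateCheck; infer_instance

-- ===== CLAIM (what is proved, stated in full; the proofs are below) =====
def Claim_equal_duplicateCheck : Prop := ∀ (path : List String), Dom_duplicateCheck path → Spec_duplicateCheck path (duplicateCheck path)

-- ===== LEMMAS AND PROOFS =====

theorem sum_ge_length (c : String → Int) (ks : List String)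
    (h1 : ∀ k ∈ ks, 1 ≤ c k) : (ks.length : Int) ≤ (ks.map c).sum := by
  induction ks with
  | nil => simp
  | cons a t ih =>
    have ha := h1 a (by simp)
    have ht := ih (fun k h => h1 k (by simp [h]))
    simp only [List.map_cons, List.sum_cons, List.length_cons]
    push_cast
    omega

-- A's loop over distinct keys, as a closed form on the sum of the counts
theorem dupLoopA_eq (counter : PySem.Dict String Int) (ks : List String)
    (h1 : ∀ k ∈ ks, 1 ≤ counter.getD k 0) (check : Bool) :
    dupLoopA counter ks check =
      decide ((ks.map (fun k => counter.getD k 0)).sum - (ks.length : Int)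
                + (if check then 1 else 0) ≤ 1) := by
  induction ks generalizing check with
  | nil => cases check <;> simp [dupLoopA]
  | cons k ks ih =>
    have hk : 1 ≤ counter.getD k 0 := h1 k (by simp)
    have hks : ∀ k' ∈ ks, 1 ≤ counter.getD k' 0 := fun k' h => h1 k' (by simp [h])
    have hsum : (ks.length : Int) ≤ (ks.map (fun k => counter.getD k 0)).sum :=
      sum_ge_length _ ks hks
    have hb0 : (0 : Int) ≤ (if check then 1 else 0) := by cases check <;> simp
    have hb1 : (if check then (1 : Int) else 0) ≤ 1 := by cases check <;> simp
    simp only [dupLoopA, List.map_cons, List.sum_cons, List.length_cons]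
    by_cases h2 : counter.getD k 0 > 2
    · rw [if_pos h2]
      symm
      simp only [decide_eq_false_iff_not]
      push_cast
      omega
    · rw [if_neg h2]
      by_cases h3 : counter.getD k 0 > 1
      · rw [if_pos h3]
        cases check with
        | true =>
          symm
          simp only [decide_eq_false_iff_not, if_true]
          push_cast
          omega
        | false =>
          simp only [Bool.false_eq_true, if_neg (by simp : ¬False)]
          rw [ih hks true]
          simp only [decide_eq_decide, if_true]
          push_cast
          omega
      · rw [if_neg h3, ih hks check]
        simp only [decide_eq_decide]
        push_cast
        omega

theorem dedup_perm_dedup (L : List String) : (PySem.List.dedup L).Perm L.dedup := by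
  rw [List.perm_ext_iff_of_nodup (PySem.List.nodup_dedup L) L.nodup_dedup]
  intro a
  rw [PySem.List.mem_dedup, List.mem_dedup]

theorem sum_counts_dedup (L : List String) :
    ((PySem.List.dedup L).map (fun k => (L.count k : Int))).sum = (L.length : Int) := by
  have hperm : ((PySem.List.dedup L).map (fun k => (L.count k : Int))).Perm
      (L.dedup.map (fun k => (L.count k : Int))) := (dedup_perm_dedup L).map _
  rw [hperm.sum_eq]
  have h : (L.dedup.map (fun k => (L.count k : Int))).sum
      = (((L.dedup.map (fun k => L.count k)).sum : Nat) : Int) := by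
    simp [Nat.cast_list_sum, Function.comp_def]
  rw [h, List.sum_map_count_dedup_eq_length]

-- ===== VERDICT (by name: the statement is the Claim_ definition above) =====
theorem duplicateCheck_spec : Claim_equal_duplicateCheck := by
  intro path _
  unfold Spec_duplicateCheck duplicateCheck duplicateCheck_alt
  set L := (PySem.List.slice path (some 1) none).filter pyStrIslower with hL
  have hkeys : (PySem.Dict.counter L (κ := String)).keys = PySem.List.dedup L := by
    rw [PySem.Dict.keys_counter, PySem.List.dedup_eq_ofList]
  have hcnt : ∀ k, (PySem.Dict.counter L (κ := String)).getD k 0 = (L.count k : Int) := by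
    intro k; rw [PySem.Dict.getD_counter]
  rw [dupLoopA_eq]
  · rw [hkeys]
    have hm : ((PySem.List.dedup L).map (fun k => (PySem.Dict.counter L (κ := String)).getD k 0))
        = (PySem.List.dedup L).map (fun k => (L.count k : Int)) := by
      apply List.map_congr_left; intro k _; exact hcnt k
    rw [hm, sum_counts_dedup]
    have hlen : (PySem.Set.ofList L).length = (PySem.List.dedup L).length := by
      rw [PySem.List.dedup_eq_ofList]
    simp [hlen]
  · intro k hk
    rw [hcnt k]
    have : k ∈ L := by
      rw [hkeys] at hk; exact (PySem.List.mem_dedup L k).1 hk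
    have := List.count_pos_iff.2 this
    omega
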